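-- pv_equiv track=rewrite | github.com/rodmena-limited/trust5 | trust5/tasks/validate_helpers.py | _scope_test_command
-- ===== SOURCE A (Python) =====
-- _TEST_DIR_TOKENS = frozenset({"tests/", "tests", "test/", "test", "spec/", "spec"})
--
-- def _scope_test_command(
--     cmd: str,
--     test_files: list[str],
-- ) -> str:
--     """Rewrite a test command to run specific files instead of a directory.
--
--     Replaces directory tokens (``tests/``, ``test/``) with concrete file paths.
--     Returns the original command unchanged if no directory tokens are found.
--     """
--     if not test_files:
--         return cmd
--
--     segments = cmd.split("&&")
--     result_segments: list[str] = []
--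
--     for segment in segments:
--         tokens = segment.split()
--         if not tokens:
--             result_segments.append(segment)
--             continue
--
--         dir_indices: list[int] = []
--         for i, token in enumerate(tokens):
--             clean = token.strip("'\"").rstrip("/")
--             if clean.lower() in {t.rstrip("/") for t in _TEST_DIR_TOKENS}:
--                 dir_indices.append(i)
--
--         if not dir_indices:
--             result_segments.append(segment)
--             continue
--
--         # Replace directory tokens with specific test files
--         new_tokens: list[str] = []
--         for i, token in enumerate(tokens):
--             if i in dir_indices:
--                 # Replace only the first directory token; drop subsequent ones
--                 if i == dir_indices[0]:
--                     new_tokens.extend(test_files)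
--             else:
--                 new_tokens.append(token)
--
--         leading = " " if segment.startswith(" ") else ""
--         trailing = " " if segment.endswith(" ") else ""
--         result_segments.append(f"{leading}{' '.join(new_tokens)}{trailing}")
--
--     return "&&".join(result_segments)
-- ===== SOURCE B (Python) =====
-- _DIR_NAMES = {"tests", "test", "spec"}
--
--
-- def _is_dir_token(token: str) -> bool:
--     return token.strip("'\"").rstrip("/").lower() in _DIR_NAMES
--
--
-- def _scope_segment(segment: str, test_files: list[str]) -> str:
--     """Find the first directory token; splice the files in its place and drop
--     the other directory tokens, keeping leading/trailing spaces."""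
--     tokens = segment.split()
--     first = next((i for i, t in enumerate(tokens) if _is_dir_token(t)), None)
--     if first is None:
--         return segment
--     body = tokens[:first] + test_files + [
--         t for t in tokens[first + 1:] if not _is_dir_token(t)
--     ]
--     lead = " " if segment.startswith(" ") else ""
--     trail = " " if segment.endswith(" ") else ""
--     return f"{lead}{' '.join(body)}{trail}"
--
--
-- def _scope_test_command(
--     cmd: str,
--     test_files: list[str],
-- ) -> str:
--     """Rewrite a test command to run specific files instead of a directory."""
--     if not test_files:
--         return cmd
--     return "&&".join(_scope_segment(seg, test_files) for seg in cmd.split("&&"))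
-- ===== Notes on version B (the rewrite author's own statement) =====
-- stated objective: simpler
-- what changed: Per segment, B finds the index of the FIRST directory token (next/enumerate), then builds the result by splicing: tokens before it ++ test_files ++ the non-dir tokens after it (a filter), instead of A's two enumerate passes that first collect a dir_indices list and then rebuild by index membership against it; segments are joined with a single generator expression.
import Mathlib
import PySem

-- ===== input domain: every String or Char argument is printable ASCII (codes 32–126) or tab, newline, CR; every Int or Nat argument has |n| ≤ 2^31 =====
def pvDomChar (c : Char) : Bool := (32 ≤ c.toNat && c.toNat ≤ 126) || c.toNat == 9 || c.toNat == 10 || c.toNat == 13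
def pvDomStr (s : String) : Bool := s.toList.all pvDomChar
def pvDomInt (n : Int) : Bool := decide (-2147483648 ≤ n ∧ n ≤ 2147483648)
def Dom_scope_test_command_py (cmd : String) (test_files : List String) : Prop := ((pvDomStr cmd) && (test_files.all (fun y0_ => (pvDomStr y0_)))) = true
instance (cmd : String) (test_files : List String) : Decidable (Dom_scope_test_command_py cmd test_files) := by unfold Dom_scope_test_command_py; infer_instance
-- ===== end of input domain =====

-- B replaces A's two enumerate passes (collect dir_indices, then rebuild by index membership)
-- with find-the-first-dir-token, then splice: take-before ++ files ++ filter-after; same return value.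

-- ===== PORT A =====
-- token.rstrip("/"): hand port (PySem has no chars-argument rstrip); exact: drops trailing '/' chars
def pvRstripSlashA (cs : List Char) : List Char := (cs.reverse.dropWhile (· == '/')).reverse

-- {t.rstrip("/") for t in _TEST_DIR_TOKENS}: only membership is used, so set order is irrelevant
def pvDirSetA : List (List Char) :=
  PySem.Set.ofList ((["tests/", "tests", "test/", "test", "spec/", "spec"].map String.toList).map pvRstripSlashA)

-- clean = token.strip("'\"").rstrip("/"); clean.lower() in {…}
def pvIsDirA (tok : List Char) : Bool :=
  pvDirSetA.contains (PySem.Chars.lower (pvRstripSlashA (PySem.Chars.stripChars tok ['\'', '"'])))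

def pvSegA (tfs : List (List Char)) (seg : List Char) : List Char :=
  let tokens := PySem.Chars.split₀ seg
  if tokens = [] then seg
  else
    let dir_indices : List Int := (PySem.List.enumerate tokens 0).foldl
      (fun acc p => if pvIsDirA p.2 then acc ++ [p.1] else acc) []
    if dir_indices = [] then seg
    else
      let new_tokens : List (List Char) := (PySem.List.enumerate tokens 0).foldl
        (fun acc p =>
          if dir_indices.contains p.1 then
            if p.1 = dir_indices.headD 0 then acc ++ tfs else acc
          else acc ++ [p.2]) []
      (if PySem.Chars.startswith seg [' '] then [' '] else []) ++
        PySem.Chars.join [' '] new_tokens ++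
        (if PySem.Chars.endswith seg [' '] then [' '] else [])

def scope_test_command_py (cmd : String) (test_files : List String) : String :=
  if test_files = [] then cmd
  else
    let tfs := test_files.map String.toList
    String.ofList (PySem.Chars.join ['&', '&']
      ((PySem.Chars.splitOn cmd.toList ['&', '&']).foldl
        (fun acc seg => acc ++ [pvSegA tfs seg]) []))

-- ===== PORT B =====
-- _DIR_NAMES = {"tests", "test", "spec"}
def pvDirNamesB : List (List Char) := PySem.Set.ofList ["tests".toList, "test".toList, "spec".toList]

-- _is_dir_token
def pvIsDirB (tok : List Char) : Bool :=
  pvDirNamesB.contains (PySem.Chars.lower ((((PySem.Chars.stripChars tok ['\'', '"']).reverse.dropWhile (· == '/')).reverse)))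

-- _scope_segment: next(i for i,t in enumerate(tokens) if dir) = findIdx?;
-- tokens[:first] = take, tokens[first+1:] = drop (first+1) (nonnegative in-range slices)
def pvSegB (tfs : List (List Char)) (seg : List Char) : List Char :=
  let tokens := PySem.Chars.split₀ seg
  match tokens.findIdx? pvIsDirB with
  | none => seg
  | some k =>
      let body := tokens.take k ++ tfs ++ (tokens.drop (k + 1)).filter (fun t => !pvIsDirB t)
      (if PySem.Chars.startswith seg [' '] then [' '] else []) ++
        PySem.Chars.join [' '] body ++
        (if PySem.Chars.endswith seg [' '] then [' '] else [])

def scope_test_command_py_alt (cmd : String) (test_files : List String) : String :=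
  if test_files = [] then cmd
  else
    String.ofList (PySem.Chars.join ['&', '&']
      ((PySem.Chars.splitOn cmd.toList ['&', '&']).map
        (pvSegB (test_files.map String.toList))))

-- ===== PRECONDITION & SPEC =====
def Spec_scope_test_command_py (cmd : String) (test_files : List String) (out : String) : Prop := out = scope_test_command_py_alt cmd test_files
instance (cmd : String) (test_files : List String) (out : String) : Decidable (Spec_scope_test_command_py cmd test_files out) := by unfold Spec_scope_test_command_py; infer_instance

-- ===== CLAIM (what is proved, stated in full; the proofs are below) =====
def Claim_equal_scope_test_command_py : Prop := ∀ (cmd : String) (test_files : List String), Dom_scope_test_command_py cmd test_files → Spec_scope_test_command_py cmd test_files (scope_test_command_py cmd test_files)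

-- ===== LEMMAS AND PROOFS =====

lemma pvIsDirB_eq (tok : List Char) : pvIsDirB tok = pvIsDirA tok := by
  have h : pvDirNamesB = pvDirSetA := by decide
  simp [pvIsDirA, pvIsDirB, pvRstripSlashA, h]

-- A's dir_indices, in closed form
def pvD (tokens : List (List Char)) : List Int :=
  ((PySem.List.enumerate tokens 0).filter (fun p => pvIsDirA p.2)).map (·.1)

lemma pvD_eq (tokens : List (List Char)) :
    (PySem.List.enumerate tokens 0).foldl
      (fun acc p => if pvIsDirA p.2 then acc ++ [p.1] else acc) [] = pvD tokens := by
  simpa [pvD] using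
    PySem.List.foldl_append_if (fun p : Int × List Char => pvIsDirA p.2) (·.1)
      (PySem.List.enumerate tokens 0) []

lemma pvMemD (tokens : List (List Char)) (i : Int) :
    i ∈ pvD tokens ↔ ∃ k, ∃ h : k < tokens.length, i = (k : Int) ∧ pvIsDirA tokens[k] = true := by
  simp only [pvD, List.mem_map, List.mem_filter, PySem.List.mem_enumerate_iff]
  constructor
  · rintro ⟨p, ⟨⟨k, hk, rfl⟩, hdir⟩, rfl⟩
    exact ⟨k, hk, by simp, hdir⟩
  · rintro ⟨k, hk, rfl, hdir⟩
    exact ⟨((0 : Int) + k, tokens[k]), ⟨⟨k, hk, rfl⟩, hdir⟩, by simp⟩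

lemma pvContainsD (tokens : List (List Char)) (p : Int × List Char)
    (hp : p ∈ PySem.List.enumerate tokens 0) :
    (pvD tokens).contains p.1 = pvIsDirA p.2 := by
  obtain ⟨k, hk, rfl⟩ := (PySem.List.mem_enumerate_iff tokens 0 p).1 hp
  show (pvD tokens).contains (0 + (k : Int)) = pvIsDirA tokens[k]
  rcases Bool.eq_false_or_eq_true (pvIsDirA tokens[k]) with hd | hd
  · rw [hd]
    exact List.contains_iff_mem.2 ((pvMemD _ _).2 ⟨k, hk, by simp, hd⟩)
  · rw [hd]
    apply Bool.eq_false_iff.2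
    intro hc
    obtain ⟨j, hj, hji, hdj⟩ := (pvMemD _ _).1 (List.contains_iff_mem.1 hc)
    have hjk : j = k := by omega
    subst hjk
    rw [hd] at hdj
    exact Bool.false_ne_true hdj

-- head of dir_indices is the first dir index
lemma pvD_head (tokens : List (List Char)) (k : Nat)
    (hfind : tokens.findIdx? pvIsDirA = some k) :
    (pvD tokens).headD 0 = (k : Int) := by
  obtain ⟨hk, hdir, hmin⟩ := List.findIdx?_eq_some_iff_getElem.1 hfind
  have hkD : (k : Int) ∈ pvD tokens := (pvMemD _ _).2 ⟨k, hk, rfl, hdir⟩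
  have hpw : (pvD tokens).Pairwise (· < ·) :=
    ((PySem.List.pairwise_lt_enumerate tokens 0).filter _).map _ (fun _ _ h => h)
  cases hD : pvD tokens with
  | nil => rw [hD] at hkD; simp at hkD
  | cons h t =>
    have hhD : h ∈ pvD tokens := by rw [hD]; simp
    obtain ⟨j, hj, rfl, hdj⟩ := (pvMemD _ _).1 hhD
    rw [hD] at hkD hpw
    simp only [List.headD_cons]
    rcases List.mem_cons.1 hkD with heq | hmem
    · omega
    · have hjk : j < k := by
        have := (List.pairwise_cons.1 hpw).1 _ hmem
        omega
      exact absurd hdj (hmin j hjk)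

lemma pvD_nil_iff (tokens : List (List Char)) :
    pvD tokens = [] ↔ tokens.findIdx? pvIsDirA = none := by
  rw [List.findIdx?_eq_none_iff]
  constructor
  · intro h tok htok
    obtain ⟨j, hj, hje⟩ := List.mem_iff_getElem.1 htok
    by_contra hc
    have : (j : Int) ∈ pvD tokens := (pvMemD _ _).2 ⟨j, hj, rfl, by rw [hje]; simpa using hc⟩
    rw [h] at this; simp at this
  · intro h
    cases hD : pvD tokens with
    | nil => rfl
    | cons i t =>
      have : i ∈ pvD tokens := by rw [hD]; simp
      obtain ⟨j, hj, rfl, hdj⟩ := (pvMemD _ _).1 this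
      have := h tokens[j] (List.getElem_mem hj)
      rw [hdj] at this; simp at this

-- after the first dir index, the flatMap keeps exactly the non-dir tokens
lemma pvTail_filter (tfs : List (List Char)) (h : Int) :
    ∀ (l : List (List Char)) (u : Int), h < u →
    (PySem.List.enumerate l u).flatMap
        (fun p => if pvIsDirA p.2 then (if p.1 = h then tfs else []) else [p.2])
      = l.filter (fun t => !pvIsDirA t) := by
  intro l
  induction l with
  | nil => intro u _; simp
  | cons t ts ih =>
    intro u hu
    rw [PySem.List.enumerate_cons]
    rcases Bool.eq_false_or_eq_true (pvIsDirA t) with hd | hd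
    · simp [hd, ih (u + 1) (by omega : h < u + 1)]
      intro h'
      exact absurd h' (by omega)
    · simp [hd, ih (u + 1) (by omega : h < u + 1)]

-- the whole flatMap splices the files at the first dir index
lemma pvSplice (tfs : List (List Char)) :
    ∀ (l : List (List Char)) (s : Int) (k : Nat), l.findIdx? pvIsDirA = some k →
    (PySem.List.enumerate l s).flatMap
        (fun p => if pvIsDirA p.2 then (if p.1 = s + (k : Int) then tfs else []) else [p.2])
      = l.take k ++ tfs ++ (l.drop (k + 1)).filter (fun t => !pvIsDirA t) := by
  intro l
  induction l with
  | nil => intro s k h; simp at h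
  | cons t ts ih =>
    intro s k hfind
    rw [PySem.List.enumerate_cons]
    simp only [List.flatMap_cons]
    rcases Bool.eq_false_or_eq_true (pvIsDirA t) with hd | hd
    · -- first token is dir: k = 0
      rw [List.findIdx?_cons, hd] at hfind
      simp at hfind
      subst hfind
      rw [hd]
      simp only [Nat.cast_zero, add_zero, if_pos rfl]
      rw [pvTail_filter tfs s ts (s + 1) (by omega)]
      simp
    · -- first token not dir: k = k' + 1
      rw [List.findIdx?_cons, hd] at hfind
      simp at hfind
      obtain ⟨k', hk', rfl⟩ := hfind
      rw [hd]
      simp only [Bool.false_eq_true, if_false]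
      have hc : s + ((k' + 1 : Nat) : Int) = (s + 1) + (k' : Int) := by push_cast; ring
      rw [hc, ih (s + 1) k' hk']
      simp [List.take_succ_cons, List.drop_succ_cons]

-- A's rebuild loop, as an extend-per-element fold
lemma pvAloop (tfs : List (List Char)) (D : List Int) (l : List (Int × List Char)) :
    ∀ acc, l.foldl
        (fun acc p =>
          if D.contains p.1 then
            if p.1 = D.headD 0 then acc ++ tfs else acc
          else acc ++ [p.2]) acc
      = acc ++ l.flatMap
          (fun p => if D.contains p.1 then (if p.1 = D.headD 0 then tfs else []) else [p.2]) := by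
  induction l with
  | nil => intro acc; simp
  | cons p ps ih =>
    intro acc
    simp only [List.foldl_cons, List.flatMap_cons]
    split_ifs with h1 h2 <;> rw [ih] <;> simp

lemma pvSeg_eq (tfs : List (List Char)) (seg : List Char) : pvSegA tfs seg = pvSegB tfs seg := by
  have hfun : pvIsDirB = pvIsDirA := funext pvIsDirB_eq
  simp only [pvSegA, pvSegB, hfun]
  cases htok : PySem.Chars.split₀ seg with
  | nil => simp
  | cons t ts =>
    rw [if_neg (by simp), pvD_eq]
    cases hfind : (t :: ts).findIdx? pvIsDirA with
    | none => rw [if_pos ((pvD_nil_iff _).2 hfind)]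
    | some k =>
      have hDne : pvD (t :: ts) ≠ [] := by
        intro h; rw [(pvD_nil_iff (t :: ts)).1 h] at hfind; simp at hfind
      rw [if_neg hDne, pvAloop]
      have hcongr : (PySem.List.enumerate (t :: ts) 0).flatMap
            (fun p => if (pvD (t :: ts)).contains p.1 then
                (if p.1 = (pvD (t :: ts)).headD 0 then tfs else []) else [p.2])
          = (PySem.List.enumerate (t :: ts) 0).flatMap
            (fun p => if pvIsDirA p.2 then (if p.1 = (0 : Int) + (k : Int) then tfs else []) else [p.2]) := by
        simp only [List.flatMap_def]
        apply congrArg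
        apply List.map_congr_left
        intro p hp
        rw [pvContainsD (t :: ts) p hp, pvD_head (t :: ts) k hfind]
        norm_num
      rw [hcongr, pvSplice tfs (t :: ts) 0 k hfind]
      simp

-- ===== VERDICT (by name: the statement is the Claim_ definition above) =====
theorem scope_test_command_py_spec : Claim_equal_scope_test_command_py := by
  intro cmd test_files _
  unfold Spec_scope_test_command_py scope_test_command_py scope_test_command_py_alt
  split_ifs with h
  · rfl
  · simp only [pvSeg_eq]
    rw [PySem.List.foldl_append_singleton_eq_map (pvSegB (test_files.map String.toList)) (PySem.Chars.splitOn cmd.toList ['&', '&']) []]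
    simp
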